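-- pv_equiv track=rewrite | github.com/ST-TOP1/My-home-work-ripositore | Steam_Auto_Key_Submit — копия/vk.py | resolve_asterisks
-- ===== SOURCE A (Python) =====
-- def resolve_asterisks(keys):
--     """Замена символа * в ключах на числа от 0 до 9."""
--     resolved_keys = []
--     for key in keys:
--         if '*' in key:  # Если есть символ *, заменяем его
--             queue = [key]
--             while '*' in queue[0]:  # Пока есть *, заменяем по очереди
--                 current_key = queue.pop(0)
--                 for digit in range(10):  # Числа от 0 до 9
--                     queue.append(current_key.replace('*', str(digit), 1))  # Заменяем только первую *
--             resolved_keys.extend(queue)  # Добавляем все варианты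
--         else:
--             resolved_keys.append(key)  # Если нет *, оставляем как есть
--     return resolved_keys
-- ===== SOURCE B (Python) =====
-- def resolve_asterisks(keys):
--     """Замена символа * в ключах на числа от 0 до 9 (left-to-right prefix product scan)."""
--     out = []
--     for key in keys:
--         prefixes = ['']
--         for c in key:
--             if c == '*':
--                 prefixes = [p + d for p in prefixes for d in '0123456789']
--             else:
--                 prefixes = [p + c for p in prefixes]
--         out.extend(prefixes)
--     return out
-- ===== Notes on version B (the rewrite author's own statement) =====
-- stated objective: alternative
-- what changed: Replaced A's per-key BFS queue (pop the head, re-replace its first '*' with each digit, re-scan) with a single left-to-right scan over the key's characters that maintains the list of expanded prefixes, taking the cartesian product with the digits 0-9 at each '*'; same output values and order, at a higher constant cost per output character.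
import Mathlib
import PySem

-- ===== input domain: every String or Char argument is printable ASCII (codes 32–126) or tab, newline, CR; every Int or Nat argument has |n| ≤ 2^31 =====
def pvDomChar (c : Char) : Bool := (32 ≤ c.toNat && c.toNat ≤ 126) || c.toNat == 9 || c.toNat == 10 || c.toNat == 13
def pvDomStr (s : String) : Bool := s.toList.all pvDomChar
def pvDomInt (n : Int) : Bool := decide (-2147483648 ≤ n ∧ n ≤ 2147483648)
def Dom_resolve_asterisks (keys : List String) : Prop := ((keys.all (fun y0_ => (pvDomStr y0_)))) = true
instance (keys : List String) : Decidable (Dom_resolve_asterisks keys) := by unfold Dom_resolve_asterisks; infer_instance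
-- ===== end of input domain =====

-- B replaces A's per-key BFS queue (re-replace the first '*') by a single left-to-right scan
-- maintaining the list of expanded prefixes; objective: alternative (same output, same order).

-- ===== PORT A =====
-- str(digit) for digit in range(10) / the characters of "0123456789"
def pvDigits : List Char := ['0', '1', '2', '3', '4', '5', '6', '7', '8', '9']

-- exact port of Python's key.replace('*', d, 1) for the single-char pattern '*'
def pvReplaceFirstStar : List Char → Char → List Char
  | [], _ => []
  | c :: cs, d => if c = '*' then d :: cs else c :: pvReplaceFirstStar cs d

-- the two facts the A port's termination proof cites
lemma pvDigit_ne_star {d : Char} (hd : d ∈ pvDigits) : d ≠ '*' := by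
  revert hd; simp only [pvDigits, List.mem_cons, List.not_mem_nil, or_false]
  rintro (rfl|rfl|rfl|rfl|rfl|rfl|rfl|rfl|rfl|rfl) <;> decide

lemma count_replaceFirstStar {key : List Char} {d : Char} (h : '*' ∈ key) (hds : d ≠ '*') :
    (pvReplaceFirstStar key d).count '*' = key.count '*' - 1 := by
  induction key with
  | nil => simp at h
  | cons c cs ih =>
    by_cases hcstar : c = '*'
    · subst hcstar; simp [pvReplaceFirstStar, hds]
    · have hcs : '*' ∈ cs := by
        rcases List.mem_cons.mp h with h1 | h1
        · exact absurd h1.symm hcstar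
        · exact h1
      have hpos : 0 < cs.count '*' := List.count_pos_iff.mpr hcs
      simp only [pvReplaceFirstStar, if_neg hcstar, List.count_cons, ih hcs]
      omega

-- the inner while-loop: pop the front of the queue while it still contains '*',
-- appending the ten one-digit replacements at the back
def pvBfs (queue : List (List Char)) : List (List Char) :=
  match queue with
  | [] => []
  | q0 :: rest =>
    if '*' ∈ q0 then
      pvBfs (rest ++ pvDigits.map (fun d => pvReplaceFirstStar q0 d))
    else q0 :: rest
termination_by ((queue.map (fun q => 11 ^ q.count '*')).sum)
decreasing_by
  rename_i hstar
  simp only [List.map_append, List.sum_append, List.map_map, List.map_cons, List.sum_cons,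
    Function.comp_def]
  have hpos : 0 < q0.count '*' := List.count_pos_iff.mpr hstar
  have hm : (pvDigits.map fun d => 11 ^ (pvReplaceFirstStar q0 d).count '*').sum
      = 10 * 11 ^ (q0.count '*' - 1) := by
    have hcongr : pvDigits.map (fun d => 11 ^ (pvReplaceFirstStar q0 d).count '*')
        = pvDigits.map (fun _ => 11 ^ (q0.count '*' - 1)) :=
      List.map_congr_left fun d hd => by
        rw [count_replaceFirstStar hstar (pvDigit_ne_star hd)]
    rw [hcongr]; simp [pvDigits]; ring
  rw [hm]
  have hlt : 10 * 11 ^ (q0.count '*' - 1) < 11 ^ q0.count '*' := by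
    calc 10 * 11 ^ (q0.count '*' - 1) < 11 * 11 ^ (q0.count '*' - 1) := by
          have : (0:ℕ) < 11 ^ (q0.count '*' - 1) := Nat.pow_pos (by norm_num)
          omega
      _ = 11 ^ (q0.count '*' - 1 + 1) := by ring
      _ = 11 ^ q0.count '*' := by congr 1; omega
  omega

def resolve_asterisks (keys : List String) : List String :=
  keys.foldl (fun acc key =>
    if '*' ∈ key.toList then
      acc ++ (pvBfs [key.toList]).map String.ofList
    else
      acc ++ [key]) []

-- ===== PORT B =====
-- one pass over the key's characters: at each '*' take the product of the current
-- prefixes with the digits 0–9, at any other character append it to every prefix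
def pvScan (key : List Char) : List (List Char) :=
  key.foldl (fun prefixes c =>
    if c = '*' then prefixes.flatMap (fun p => pvDigits.map (fun d => p ++ [d]))
    else prefixes.map (fun p => p ++ [c])) [[]]

def resolve_asterisks_alt (keys : List String) : List String :=
  keys.flatMap (fun key => (pvScan key.toList).map String.ofList)

-- ===== PRECONDITION & SPEC =====
def Spec_resolve_asterisks (keys : List String) (out : List String) : Prop := out = resolve_asterisks_alt keys
instance (keys : List String) (out : List String) : Decidable (Spec_resolve_asterisks keys out) := by unfold Spec_resolve_asterisks; infer_instance

-- ===== CLAIM (what is proved, stated in full; the proofs are below) =====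
def Claim_equal_resolve_asterisks : Prop := ∀ (keys : List String), Dom_resolve_asterisks keys → Spec_resolve_asterisks keys (resolve_asterisks keys)

-- ===== LEMMAS AND PROOFS =====

-- the common specification both ports are reduced to: structural expansion of a key
def pvExp : List Char → List (List Char)
  | [] => [[]]
  | c :: cs =>
    if c = '*' then pvDigits.flatMap (fun d => (pvExp cs).map (d :: ·))
    else (pvExp cs).map (c :: ·)

-- first-wildcard recursive expansion, the bridge between pvBfs and pvExp
def pvExpand (key : List Char) : List (List Char) :=
  if _h : '*' ∈ key then
    pvDigits.attach.flatMap (fun d => pvExpand (pvReplaceFirstStar key d.1))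
  else [key]
termination_by (key.count '*')
decreasing_by
  have hc := count_replaceFirstStar _h (pvDigit_ne_star d.2)
  have hpos : 0 < key.count '*' := List.count_pos_iff.mpr _h
  omega

lemma pvBfs_nil : pvBfs [] = [] := by rw [pvBfs.eq_def]

lemma pvBfs_cons (q0 : List Char) (rest : List (List Char)) :
    pvBfs (q0 :: rest) =
      if '*' ∈ q0 then pvBfs (rest ++ pvDigits.map (fun d => pvReplaceFirstStar q0 d))
      else q0 :: rest := by
  rw [pvBfs.eq_def]

lemma pvExpand_nostar {key : List Char} (h : '*' ∉ key) : pvExpand key = [key] := by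
  rw [pvExpand.eq_def]; simp [h]

lemma pvExpand_star {key : List Char} (h : '*' ∈ key) :
    pvExpand key = pvDigits.flatMap (fun d => pvExpand (pvReplaceFirstStar key d)) := by
  rw [pvExpand.eq_def]; simp only [h, dif_pos]
  conv_rhs => rw [← List.attach_map_subtype_val pvDigits, List.flatMap_map]

lemma flatMap_expand_nostar {ys : List (List Char)} (h : ∀ y ∈ ys, y.count '*' = 0) :
    ys.flatMap pvExpand = ys := by
  induction ys with
  | nil => rfl
  | cons y ys' ih =>
    have hy : '*' ∉ y := List.count_eq_zero.mp (h y (by simp))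
    simp [List.flatMap_cons, pvExpand_nostar hy, ih (fun z hz => h z (by simp [hz]))]

-- the BFS queue invariant: a front segment with n+1 stars each, a back segment with n stars each;
-- the final queue is the full expansion of the back segment followed by that of the front segment
lemma pvBfs_eq (n : ℕ) : ∀ (xs ys : List (List Char)),
    (∀ x ∈ xs, x.count '*' = n + 1) → (∀ y ∈ ys, y.count '*' = n) →
    pvBfs (xs ++ ys) = ys.flatMap pvExpand ++ xs.flatMap pvExpand := by
  induction n with
  | zero =>
    intro xs ys hx hy
    induction xs generalizing ys with
    | nil =>
      simp only [List.nil_append, List.flatMap_nil, List.append_nil]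
      rw [flatMap_expand_nostar hy]
      cases ys with
      | nil => exact pvBfs_nil
      | cons y ys' =>
        have hy0 : '*' ∉ y := List.count_eq_zero.mp (hy y (by simp))
        rw [pvBfs_cons]; simp [hy0]
    | cons x xs' ihx =>
      have hxs : '*' ∈ x := List.count_pos_iff.mp (by rw [hx x (by simp)]; omega)
      rw [List.cons_append, pvBfs_cons]
      simp only [hxs, if_true]
      rw [List.append_assoc]
      have hxs' := fun z hz => hx z (List.mem_cons_of_mem _ hz)
      rw [ihx _ hxs'
        (by
          intro y hyy
          rcases List.mem_append.mp hyy with h1 | h2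
          · exact hy y h1
          · obtain ⟨d, hd, rfl⟩ := List.mem_map.mp h2
            rw [count_replaceFirstStar hxs (pvDigit_ne_star hd), hx x (by simp)]
            try omega)]
      rw [List.flatMap_append, List.flatMap_cons]
      have hchild : (pvDigits.map (fun d => pvReplaceFirstStar x d)).flatMap pvExpand
          = pvExpand x := by
        rw [List.flatMap_map, pvExpand_star hxs]
      rw [hchild, List.append_assoc]
  | succ m ihn =>
    intro xs ys hx hy
    induction xs generalizing ys with
    | nil =>
      simp only [List.nil_append, List.flatMap_nil, List.append_nil]
      have := ihn ys [] (by simpa using hy) (by simp)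
      simpa using this
    | cons x xs' ihx =>
      have hxs : '*' ∈ x := List.count_pos_iff.mp (by rw [hx x (by simp)]; omega)
      rw [List.cons_append, pvBfs_cons]
      simp only [hxs, if_true]
      rw [List.append_assoc]
      have hxs' := fun z hz => hx z (List.mem_cons_of_mem _ hz)
      rw [ihx _ hxs'
        (by
          intro y hyy
          rcases List.mem_append.mp hyy with h1 | h2
          · exact hy y h1
          · obtain ⟨d, hd, rfl⟩ := List.mem_map.mp h2
            rw [count_replaceFirstStar hxs (pvDigit_ne_star hd), hx x (by simp)]
            try omega)]
      rw [List.flatMap_append, List.flatMap_cons]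
      have hchild : (pvDigits.map (fun d => pvReplaceFirstStar x d)).flatMap pvExpand
          = pvExpand x := by
        rw [List.flatMap_map, pvExpand_star hxs]
      rw [hchild, List.append_assoc]

lemma pvBfs_singleton (k : List Char) : pvBfs [k] = pvExpand k := by
  have := pvBfs_eq (k.count '*') [] [k] (by simp) (by simp)
  simpa using this

-- pvExp satisfies the first-wildcard expansion equation
lemma pvExp_star {key : List Char} (h : '*' ∈ key) :
    pvExp key = pvDigits.flatMap (fun d => pvExp (pvReplaceFirstStar key d)) := by
  induction key with
  | nil => simp at h
  | cons c cs ih =>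
    by_cases hc : c = '*'
    · subst hc
      simp only [pvExp, if_true]
      refine List.flatMap_congr ?_  -- per digit
      intro d hd
      simp [pvReplaceFirstStar, pvExp, pvDigit_ne_star hd]
    · have hcs : '*' ∈ cs := by
        rcases List.mem_cons.mp h with h1 | h1
        · exact absurd h1.symm hc
        · exact h1
      simp only [pvExp, if_neg hc, ih hcs, List.map_flatMap]
      refine List.flatMap_congr ?_
      intro d _
      simp [pvReplaceFirstStar, hc, pvExp]

lemma pvExp_nostar {key : List Char} (h : '*' ∉ key) : pvExp key = [key] := by
  induction key with
  | nil => rfl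
  | cons c cs ih =>
    have hc : c ≠ '*' := fun hh => h (by simp [hh])
    have hcs : '*' ∉ cs := fun hh => h (by simp [hh])
    simp [pvExp, hc, ih hcs]

lemma pvExpand_eq_pvExp (key : List Char) : pvExpand key = pvExp key := by
  by_cases h : '*' ∈ key
  · rw [pvExpand_star h, pvExp_star h]
    refine List.flatMap_congr ?_
    intro d hd
    have : (pvReplaceFirstStar key d).count '*' < key.count '*' := by
      have hc := count_replaceFirstStar h (pvDigit_ne_star hd)
      have hpos : 0 < key.count '*' := List.count_pos_iff.mpr h
      omega
    exact pvExpand_eq_pvExp (pvReplaceFirstStar key d)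
  · rw [pvExpand_nostar h, pvExp_nostar h]
termination_by key.count '*'

-- the scan's loop invariant: the foldl from any prefix list is the product with pvExp
lemma pvScan_inv (key : List Char) : ∀ (prefixes : List (List Char)),
    key.foldl (fun prefixes c =>
      if c = '*' then prefixes.flatMap (fun p => pvDigits.map (fun d => p ++ [d]))
      else prefixes.map (fun p => p ++ [c])) prefixes
    = prefixes.flatMap (fun p => (pvExp key).map (p ++ ·)) := by
  induction key with
  | nil => intro prefixes; simp [pvExp]
  | cons c cs ih =>
    intro prefixes
    by_cases hc : c = '*'
    · subst hc
      simp only [List.foldl_cons, if_true, ih]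
      rw [List.flatMap_assoc]
      simp only [pvExp, if_true, List.map_flatMap, List.flatMap_map, List.map_map]
      refine List.flatMap_congr ?_
      intro p _
      refine List.flatMap_congr ?_
      intro d _
      simp [Function.comp_def]
    · simp only [List.foldl_cons, if_neg hc, ih]
      simp only [pvExp, if_neg hc, List.flatMap_map, List.map_map]
      refine List.flatMap_congr ?_
      intro p _
      simp [Function.comp_def]

lemma pvScan_eq_pvExp (key : List Char) : pvScan key = pvExp key := by
  unfold pvScan
  rw [pvScan_inv]
  simp

-- ===== VERDICT (by name: the statement is the Claim_ definition above) =====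
theorem resolve_asterisks_spec : Claim_equal_resolve_asterisks := by
  intro keys _
  unfold Spec_resolve_asterisks resolve_asterisks resolve_asterisks_alt
  rw [PySem.List.foldl_congr_mem
    (g := fun acc key => acc ++ ((pvScan key.toList).map String.ofList))]
  · rw [PySem.List.foldl_append_eq_flatMap, List.nil_append]
  · intro acc key _
    by_cases h : '*' ∈ key.toList
    · simp only [h, if_true, pvBfs_singleton, pvExpand_eq_pvExp, pvScan_eq_pvExp]
    · simp only [h, if_false, pvScan_eq_pvExp, pvExp_nostar h, List.map_cons, List.map_nil]
      simp
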